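-- pv_equiv track=rewrite | github.com/SaarShai/Primes-Equispaced | experiments/step1_analytical_proof.py | compute_R_at_kp
-- ===== SOURCE A (Python) =====
-- def compute_R_at_kp(k, p, N, mu_arr):
--     """
--     Compute R(k/p) = #{f ∈ F_N : f ≤ k/p} using Möbius inversion.
--
--     R(k/p) = 1 + Σ_{b=1}^{N} #{a : 1 ≤ a ≤ b, gcd(a,b)=1, a/b ≤ k/p}
--
--     For b < p: a/b ≤ k/p  ⟺  a ≤ kb/p  ⟺  a ≤ ⌊kb/p⌋
--     (since gcd(k,p)=1 for 1≤k≤p-1, and b < p, kb/p is not an integer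
--      unless p | b, but b < p and p is prime, so kb/p is never an integer.)
--
--     For b = p-1 (= N): we include a/b ≤ k/p fractions up to order N.
--
--     #{a ≤ m : gcd(a,b) = 1} = Σ_{d|b} μ(d) ⌊m/d⌋
--     """
--     total = 1  # for 0/1
--     for b in range(1, N + 1):
--         # Upper bound on a: a ≤ kb/p AND a ≤ b (since a/b ≤ 1)
--         # Since k/p ≤ (p-1)/p < 1, we have kb/p < b, so the constraint is a ≤ ⌊kb/p⌋
--         # But for k = p-1 and b = N = p-1: (p-1)²/p = p - 2 + 1/p, floor = p-2
--         # And b = p-1, so a ≤ p-2 which is < b. The fraction (p-1)/(p-1) = 1 > k/p,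
--         # so a/(p-1) ≤ (p-1)/p iff a ≤ (p-1)²/p = p-2+1/p, so a ≤ p-2. Good.
--
--         # However, when b ≥ p, this doesn't apply (but N = p-1 < p, so b < p always).
--         m = (k * b) // p  # = ⌊kb/p⌋
--         if m <= 0:
--             continue
--
--         # Count coprime integers ≤ m using Möbius
--         count = 0
--         d = 1
--         while d * d <= b:
--             if b % d == 0:
--                 if d <= len(mu_arr) - 1:
--                     count += mu_arr[d] * (m // d)
--                 bd = b // d
--                 if bd != d and bd <= len(mu_arr) - 1:
--                     count += mu_arr[bd] * (m // bd)
--             d += 1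
--         total += count
--     return total
-- ===== SOURCE B (Python) =====
-- def compute_R_at_kp(k, p, N, mu_arr):
--     # Swapped-order Moebius sum: iterate over each denominator-divisor d and its
--     # multiples b = d*j <= N, instead of trial-dividing each b up to sqrt(b).
--     total = 1
--     L = len(mu_arr) - 1
--     top = min(N, L)
--     for d in range(1, top + 1):
--         for j in range(1, N // d + 1):
--             m = (k * (d * j)) // p
--             if m > 0:
--                 total += mu_arr[d] * (m // d)
--     return total
-- ===== Notes on version B (the rewrite author's own statement) =====
-- stated objective: faster
-- what changed: Instead of trial-dividing each b up to sqrt(b) to enumerate its divisors, B swaps the order of summation: for each divisor index d <= min(N, len(mu_arr)-1) it walks the multiples b = d*j <= N, adding the same Moebius term, turning the O(N*sqrt(N)) divisor enumeration into an O(N log N) sieve-style double loop.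
import Mathlib
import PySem

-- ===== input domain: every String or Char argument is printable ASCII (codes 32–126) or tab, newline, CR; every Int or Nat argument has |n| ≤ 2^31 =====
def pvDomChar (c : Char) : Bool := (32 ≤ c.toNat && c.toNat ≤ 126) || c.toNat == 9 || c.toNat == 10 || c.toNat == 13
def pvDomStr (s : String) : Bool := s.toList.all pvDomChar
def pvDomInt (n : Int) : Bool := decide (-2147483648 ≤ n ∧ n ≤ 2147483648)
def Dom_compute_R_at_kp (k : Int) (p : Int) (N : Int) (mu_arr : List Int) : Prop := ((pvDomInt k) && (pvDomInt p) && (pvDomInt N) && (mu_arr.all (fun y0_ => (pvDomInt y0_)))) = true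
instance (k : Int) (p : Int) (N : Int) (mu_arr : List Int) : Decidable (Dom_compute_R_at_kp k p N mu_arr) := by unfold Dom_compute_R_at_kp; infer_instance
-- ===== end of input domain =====

-- B replaces A's per-denominator trial division up to sqrt(b) by a swapped-order (sieve-style)
-- double loop over each divisor index d and its multiples d*j ≤ N; objective: faster.

-- ===== PORT A =====
-- A's inner `while d*d <= b` loop (count starts at 0, d at 1).
def pvAInner (mu_arr : List Int) (b m : Int) (d : Int) (count : Int) : Int :=
  if _h : d * d ≤ b then
    let count' :=
      if PySem.Int.mod b d = 0 then
        let c1 := if d ≤ (mu_arr.length : Int) - 1 then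
            count + PySem.List.pyGetD mu_arr d 0 * PySem.Int.floordiv m d else count
        let bd := PySem.Int.floordiv b d
        if bd ≠ d ∧ bd ≤ (mu_arr.length : Int) - 1 then
          c1 + PySem.List.pyGetD mu_arr bd 0 * PySem.Int.floordiv m bd else c1
      else count
    pvAInner mu_arr b m (d + 1) count'
  else count
termination_by (b + 1 - d).toNat
decreasing_by
  have hd : d ≤ b := by nlinarith [sq_nonneg d, sq_nonneg (d - 1)]
  omega

def compute_R_at_kp (k : Int) (p : Int) (N : Int) (mu_arr : List Int) : Int :=
  (PySem.List.pyRange 1 (N + 1)).foldl (fun total b =>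
    let m := PySem.Int.floordiv (k * b) p
    if m ≤ 0 then total
    else total + pvAInner mu_arr b m 1 0) 1

def compute_R_at_kp_alt (k : Int) (p : Int) (N : Int) (mu_arr : List Int) : Int :=
  let L : Int := (mu_arr.length : Int) - 1
  let top := min N L
  (PySem.List.pyRange 1 (top + 1)).foldl (fun total d =>
    (PySem.List.pyRange 1 (PySem.Int.floordiv N d + 1)).foldl (fun t j =>
      let m := PySem.Int.floordiv (k * (d * j)) p
      if 0 < m then t + PySem.List.pyGetD mu_arr d 0 * PySem.Int.floordiv m d else t) total) 1

-- ===== PRECONDITION & SPEC =====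
-- Pre_ excludes exactly p = 0, where the Python A raises ZeroDivisionError at `(k*b)//p`.
def Pre_compute_R_at_kp (k : Int) (p : Int) (N : Int) (mu_arr : List Int) : Prop := p ≠ 0
instance (k : Int) (p : Int) (N : Int) (mu_arr : List Int) : Decidable (Pre_compute_R_at_kp k p N mu_arr) := by unfold Pre_compute_R_at_kp; infer_instance
def pvWitness_compute_R_at_kp : Int × Int × Int × List Int := (2, 5, 4, [0, 1, -1, -1, 0])

def Spec_compute_R_at_kp (k : Int) (p : Int) (N : Int) (mu_arr : List Int) (out : Int) : Prop := out = compute_R_at_kp_alt k p N mu_arr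
instance (k : Int) (p : Int) (N : Int) (mu_arr : List Int) (out : Int) : Decidable (Spec_compute_R_at_kp k p N mu_arr out) := by unfold Spec_compute_R_at_kp; infer_instance

-- ===== CLAIM =====
def Claim_equal_compute_R_at_kp : Prop := ∀ (k : Int) (p : Int) (N : Int) (mu_arr : List Int), Dom_compute_R_at_kp k p N mu_arr → Pre_compute_R_at_kp k p N mu_arr → Spec_compute_R_at_kp k p N mu_arr (compute_R_at_kp k p N mu_arr)

-- ===== LEMMAS AND PROOFS =====

def pvM (k p : Int) (b : ℕ) : Int := PySem.Int.floordiv (k * (b : Int)) p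

def pvTerm (k p : Int) (mu_arr : List Int) (e b : ℕ) : Int :=
  if 0 < pvM k p b ∧ (e : Int) ≤ (mu_arr.length : Int) - 1 then
    PySem.List.pyGetD mu_arr e 0 * PySem.Int.floordiv (pvM k p b) e
  else 0

def pvG (mu_arr : List Int) (m : Int) (e : ℕ) : Int :=
  if (e : Int) ≤ (mu_arr.length : Int) - 1 then
    PySem.List.pyGetD mu_arr e 0 * PySem.Int.floordiv m e
  else 0

theorem pyRange_nil_of_le {a b : Int} (h : b ≤ a) : PySem.List.pyRange a b = [] := by
  rw [List.eq_nil_iff_forall_not_mem]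
  intro x hx
  rw [PySem.List.mem_pyRange_one] at hx
  omega

theorem pvFold_sum (g : Int → Int) (t : ℕ) (init : Int) :
    (PySem.List.pyRange 1 ((t : Int) + 1)).foldl (fun acc x => acc + g x) init
      = init + ∑ i ∈ Finset.Ioc 0 t, g (i : Int) := by
  induction t with
  | zero =>
      rw [show ((0:ℕ) : Int) + 1 = 1 by norm_num, pyRange_nil_of_le le_rfl]
      simp
  | succ t ih =>
      have h1 : ((t + 1 : ℕ) : Int) + 1 = ((t : Int) + 1) + 1 := by push_cast; ring
      rw [h1, PySem.List.pyRange_one_succ_right (by omega), List.foldl_append, ih]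
      rw [Finset.sum_Ioc_succ_top (Nat.zero_le t)]
      simp [add_assoc]

theorem pvRange_toNat (M : Int) :
    PySem.List.pyRange 1 (M + 1) = PySem.List.pyRange 1 ((M.toNat : Int) + 1) := by
  by_cases h : 0 ≤ M
  · congr 1; omega
  · rw [pyRange_nil_of_le (by omega), pyRange_nil_of_le (by omega)]

theorem pv_min_dvd {b e : ℕ} (he : e ∣ b) : min e (b / e) ∣ b := by
  rcases min_cases e (b / e) with ⟨h1, _⟩ | ⟨h1, _⟩ <;> rw [h1]
  · exact he
  · exact Nat.div_dvd_of_dvd he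

theorem pv_min_eq {b e d : ℕ} (hb : 1 ≤ b) (he : e ∣ b) (h : min e (b / e) = d) :
    e = d ∨ e = b / d := by
  rcases min_cases e (b / e) with ⟨h1, _⟩ | ⟨h1, _⟩
  · left; omega
  · right
    have h2 : b / e = d := by omega
    rw [← h2, Nat.div_div_self he (by omega)]

theorem pvAInner_fuel (mu_arr : List Int) (b : ℕ) (m : Int) (hb : 1 ≤ b) :
    ∀ (fuel : ℕ) (d : ℕ) (count : Int), b + 1 - d ≤ fuel → 1 ≤ d →
      pvAInner mu_arr (b : Int) m (d : Int) count
        = count + ∑ e ∈ b.divisors.filter (fun e => d ≤ min e (b / e)), pvG mu_arr m e := by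
  intro fuel
  induction fuel with
  | zero =>
    intro d count hfuel hd
    have hdd : d ≤ d * d := Nat.le_mul_of_pos_left d hd
    rw [pvAInner, dif_neg (by exact_mod_cast (by omega : ¬ (d * d ≤ b)) : ¬ ((d:Int) * d ≤ (b:Int)))]
    rw [Finset.filter_false_of_mem, Finset.sum_empty, add_zero]
    intro e hediv hmin
    have he := Nat.divisor_le hediv
    have : min e (b / e) ≤ e := min_le_left _ _
    omega
  | succ fuel ih =>
    intro d count hfuel hd
    rw [pvAInner]
    by_cases hlt : (d : Int) * d ≤ (b : Int)
    · rw [dif_pos hlt]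
      have hddb : d * d ≤ b := by exact_mod_cast hlt
      have hdb : d ≤ b := by nlinarith
      have hdpos : 0 < d := hd
      have hcast1 : ((d : Int) + 1) = ((d + 1 : ℕ) : Int) := by push_cast; ring
      have hfd : PySem.Int.floordiv (b : Int) (d : Int) = ((b / d : ℕ) : Int) :=
        PySem.Int.floordiv_natCast b d
      have hdle : d ≤ b / d := (Nat.le_div_iff_mul_le hdpos).mpr hddb
      by_cases hdvd : d ∣ b
      · have hmod : PySem.Int.mod (b : Int) (d : Int) = 0 :=
          (PySem.Int.mod_eq_zero_iff_dvd _ _).mpr (by exact_mod_cast hdvd)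
        simp only [hmod, hfd]
        have hcount' :
            (if ((b / d : ℕ) : Int) ≠ (d:Int) ∧ ((b / d : ℕ) : Int) ≤ (mu_arr.length : Int) - 1 then
              (if (d:Int) ≤ (mu_arr.length : Int) - 1 then
                  count + PySem.List.pyGetD mu_arr d 0 * PySem.Int.floordiv m d else count)
                + PySem.List.pyGetD mu_arr ((b / d : ℕ) : Int) 0 * PySem.Int.floordiv m ((b / d : ℕ) : Int)
             else
              (if (d:Int) ≤ (mu_arr.length : Int) - 1 then
                  count + PySem.List.pyGetD mu_arr d 0 * PySem.Int.floordiv m d else count))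
            = count + pvG mu_arr m d + (if b / d ≠ d then pvG mu_arr m (b / d) else 0) := by
          simp only [pvG, ne_eq, Nat.cast_inj]
          by_cases hq : b / d = d
          · simp [hq]
            split_ifs <;> ring
          · simp [hq]
            split_ifs <;> ring
        rw [hcount', hcast1, ih (d + 1) _ (by omega) (by omega)]
        have hbd0 : b ≠ 0 := by omega
        have hmind : min d (b / d) = d := min_eq_left hdle
        have hminbd : min (b / d) (b / (b / d)) = d := by
          rw [Nat.div_div_self hdvd hbd0]; exact min_eq_right hdle
        have hsplit : b.divisors.filter (fun e => d ≤ min e (b / e))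
            = b.divisors.filter (fun e => d + 1 ≤ min e (b / e)) ∪ {d, b / d} := by
          ext e
          simp only [Finset.mem_union, Finset.mem_filter, Finset.mem_insert, Finset.mem_singleton,
            Nat.mem_divisors]
          constructor
          · rintro ⟨⟨he, hb0⟩, hmin⟩
            by_cases hge : d + 1 ≤ min e (b / e)
            · exact Or.inl ⟨⟨he, hb0⟩, hge⟩
            · have hmeq : min e (b / e) = d := by omega
              rcases pv_min_eq hb he hmeq with h1 | h1
              · exact Or.inr (Or.inl h1)
              · exact Or.inr (Or.inr h1)
          · rintro (⟨⟨he, hb0⟩, hmin⟩ | h1 | h1)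
            · exact ⟨⟨he, hb0⟩, by omega⟩
            · subst h1; exact ⟨⟨hdvd, hbd0⟩, by rw [hmind]⟩
            · subst h1; exact ⟨⟨Nat.div_dvd_of_dvd hdvd, hbd0⟩, by rw [hminbd]⟩
        have hdisj : Disjoint (b.divisors.filter (fun e => d + 1 ≤ min e (b / e))) ({d, b / d} : Finset ℕ) := by
          rw [Finset.disjoint_right]
          intro e hep hef
          simp only [Finset.mem_insert, Finset.mem_singleton] at hep
          simp only [Finset.mem_filter] at hef
          rcases hep with h1 | h1 <;> subst h1
          · rw [hmind] at hef; omega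
          · rw [hminbd] at hef; omega
        have hpair : ∑ e ∈ ({d, b / d} : Finset ℕ), pvG mu_arr m e
            = pvG mu_arr m d + (if b / d ≠ d then pvG mu_arr m (b / d) else 0) := by
          by_cases hbdd : b / d = d
          · rw [hbdd]; simp
          · rw [Finset.sum_pair (fun h => hbdd h.symm), if_pos hbdd]
        rw [hsplit, Finset.sum_union hdisj, hpair]
        split_ifs <;> ring
      · have hmod : ¬ PySem.Int.mod (b : Int) (d : Int) = 0 := by
          rw [PySem.Int.mod_eq_zero_iff_dvd]
          exact fun h => hdvd (by exact_mod_cast h)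
        rw [if_neg hmod, hcast1, ih (d + 1) _ (by omega) (by omega)]
        congr 1
        apply Finset.sum_congr _ (fun _ _ => rfl)
        ext e
        simp only [Finset.mem_filter, Nat.mem_divisors]
        constructor
        · rintro ⟨⟨he, hb0⟩, hmin⟩
          exact ⟨⟨he, hb0⟩, by omega⟩
        · rintro ⟨⟨he, hb0⟩, hmin⟩
          refine ⟨⟨he, hb0⟩, ?_⟩
          rcases eq_or_lt_of_le hmin with hmeq | hgt
          · have hdvd' : min e (b / e) ∣ b := pv_min_dvd he
            rw [← hmeq] at hdvd'
            exact absurd hdvd' hdvd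
          · omega
    · rw [dif_neg hlt]
      rw [Finset.filter_false_of_mem, Finset.sum_empty, add_zero]
      intro e hediv hmin
      have hb0 : b ≠ 0 := by omega
      rw [Nat.mem_divisors] at hediv
      have h1 : min e (b / e) ≤ e := min_le_left _ _
      have h2 : min e (b / e) ≤ b / e := min_le_right _ _
      have h3 : d * d ≤ e * (b / e) :=
        Nat.mul_le_mul (le_trans hmin h1) (le_trans hmin h2)
      rw [Nat.mul_div_cancel' hediv.1] at h3
      exact hlt (by exact_mod_cast h3)

theorem pvA_char (k p N : Int) (mu_arr : List Int) :
    compute_R_at_kp k p N mu_arr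
      = 1 + ∑ b ∈ Finset.Ioc 0 N.toNat, ∑ e ∈ b.divisors, pvTerm k p mu_arr e b := by
  unfold compute_R_at_kp
  dsimp only
  rw [pvRange_toNat]
  rw [PySem.List.foldl_congr_mem (PySem.List.pyRange 1 ((N.toNat : Int) + 1))
    (fun total b => if PySem.Int.floordiv (k * b) p ≤ 0 then total
      else total + pvAInner mu_arr b (PySem.Int.floordiv (k * b) p) 1 0)
    (fun acc x => acc + (if PySem.Int.floordiv (k * x) p ≤ 0 then 0
      else pvAInner mu_arr x (PySem.Int.floordiv (k * x) p) 1 0))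
    1 (by intro acc x _; dsimp only; split_ifs <;> ring)]
  rw [pvFold_sum]
  congr 1
  apply Finset.sum_congr rfl
  intro b hbm
  rw [Finset.mem_Ioc] at hbm
  obtain ⟨hb0, _⟩ := hbm
  rw [show PySem.Int.floordiv (k * (b : Int)) p = pvM k p b from rfl]
  by_cases h0 : pvM k p b ≤ 0
  · rw [if_pos h0]
    rw [Finset.sum_eq_zero]
    intro e _
    rw [pvTerm, if_neg (by rw [not_and_or]; left; omega)]
  · rw [if_neg h0]
    have hinner := pvAInner_fuel mu_arr b (pvM k p b) hb0 (b + 1) 1 0 (by omega) le_rfl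
    rw [show ((1:ℕ) : Int) = 1 by norm_num] at hinner
    rw [hinner, zero_add]
    rw [Finset.filter_true_of_mem]
    · apply Finset.sum_congr rfl
      intro e he
      rw [pvTerm, pvG]
      by_cases hc : (e : Int) ≤ (mu_arr.length : Int) - 1
      · rw [if_pos hc, if_pos ⟨by omega, hc⟩]
      · rw [if_neg hc, if_neg (by rw [not_and_or]; right; exact hc)]
    · intro e he
      rw [Nat.mem_divisors] at he
      have h1 : 1 ≤ e := Nat.pos_of_dvd_of_pos he.1 hb0
      have h2 : 1 ≤ b / e := Nat.div_pos (Nat.le_of_dvd hb0 he.1) h1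
      omega

theorem pvB_char (k p N : Int) (mu_arr : List Int) :
    compute_R_at_kp_alt k p N mu_arr
      = 1 + ∑ d ∈ Finset.Ioc 0 (min N ((mu_arr.length : Int) - 1)).toNat,
          ∑ j ∈ Finset.Ioc 0 (N.toNat / d), pvTerm k p mu_arr d (d * j) := by
  unfold compute_R_at_kp_alt
  dsimp only
  rw [pvRange_toNat]
  set L : Int := (mu_arr.length : Int) - 1 with hL
  set tn : ℕ := (min N L).toNat with htn
  rw [PySem.List.foldl_congr_mem (PySem.List.pyRange 1 ((tn : Int) + 1))
    (fun total d =>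
      (PySem.List.pyRange 1 (PySem.Int.floordiv N d + 1)).foldl (fun t j =>
        if 0 < PySem.Int.floordiv (k * (d * j)) p then
          t + PySem.List.pyGetD mu_arr d 0 * PySem.Int.floordiv (PySem.Int.floordiv (k * (d * j)) p) d
        else t) total)
    (fun acc d => acc + ∑ j ∈ Finset.Ioc 0 (N.toNat / d.toNat),
        pvTerm k p mu_arr d.toNat (d.toNat * j))
    1 ?_]
  · rw [pvFold_sum]
    congr 1
  · intro acc d hdm
    dsimp only
    rw [PySem.List.mem_pyRange_one] at hdm
    obtain ⟨hd1, hdt⟩ := hdm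
    have hdmin : d ≤ min N L := by omega
    have hN1 : 1 ≤ N := le_trans (le_trans hd1 hdmin) (min_le_left _ _)
    have hdL : d ≤ L := le_trans hdmin (min_le_right _ _)
    have hdn : d = ((d.toNat : ℕ) : Int) := by omega
    have hNn : N = ((N.toNat : ℕ) : Int) := by omega
    have hfd : PySem.Int.floordiv N d = ((N.toNat / d.toNat : ℕ) : Int) := by
      rw [hdn, hNn]; exact_mod_cast PySem.Int.floordiv_natCast N.toNat d.toNat
    rw [hfd]
    rw [PySem.List.foldl_congr_mem (PySem.List.pyRange 1 (((N.toNat / d.toNat : ℕ) : Int) + 1))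
      (fun t j => if 0 < PySem.Int.floordiv (k * (d * j)) p then
          t + PySem.List.pyGetD mu_arr d 0 * PySem.Int.floordiv (PySem.Int.floordiv (k * (d * j)) p) d
        else t)
      (fun t j => t + (if 0 < PySem.Int.floordiv (k * (d * j)) p then
          PySem.List.pyGetD mu_arr d 0 * PySem.Int.floordiv (PySem.Int.floordiv (k * (d * j)) p) d
        else 0))
      acc (by intro acc' x _; dsimp only; split_ifs <;> ring)]
    rw [pvFold_sum]
    congr 1
    apply Finset.sum_congr rfl
    intro j hjm
    rw [Finset.mem_Ioc] at hjm
    have hmval : PySem.Int.floordiv (k * (d * (j : Int))) p = pvM k p (d.toNat * j) := by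
      rw [pvM]; congr 1; push_cast; try rw [← hdn]; try ring
    rw [hmval, pvTerm]
    by_cases h0 : 0 < pvM k p (d.toNat * j)
    · rw [if_pos h0, if_pos ⟨h0, by rw [← hdn]; exact hdL⟩, ← hdn]
    · rw [if_neg h0, if_neg (by rw [not_and_or]; left; exact h0)]

theorem pvSwap (F : ℕ → ℕ → Int) (n : ℕ) :
    ∑ b ∈ Finset.Ioc 0 n, ∑ e ∈ b.divisors, F e b
      = ∑ d ∈ Finset.Ioc 0 n, ∑ j ∈ Finset.Ioc 0 (n / d), F d (d * j) := by
  rw [Finset.sum_sigma' (Finset.Ioc 0 n) (fun b => b.divisors) (fun b e => F e b),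
      Finset.sum_sigma' (Finset.Ioc 0 n) (fun d => Finset.Ioc 0 (n / d)) (fun d j => F d (d * j))]
  refine Finset.sum_nbij' (fun x => ⟨x.2, x.1 / x.2⟩) (fun x => ⟨x.1 * x.2, x.1⟩) ?_ ?_ ?_ ?_ ?_
  · rintro ⟨b, e⟩ hx
    simp only [Finset.mem_sigma, Finset.mem_Ioc, Nat.mem_divisors] at hx ⊢
    obtain ⟨⟨hb0, hbn⟩, he, hb⟩ := hx
    have he0 : 0 < e := Nat.pos_of_dvd_of_pos he hb0
    have hbe : 0 < b / e := Nat.div_pos (Nat.le_of_dvd hb0 he) he0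
    exact ⟨⟨he0, le_trans (Nat.le_of_dvd hb0 he) hbn⟩, hbe, Nat.div_le_div_right hbn⟩
  · rintro ⟨d, j⟩ hx
    simp only [Finset.mem_sigma, Finset.mem_Ioc, Nat.mem_divisors] at hx ⊢
    obtain ⟨⟨hd0, hdn⟩, hj0, hjn⟩ := hx
    refine ⟨⟨Nat.mul_pos hd0 hj0, ?_⟩, dvd_mul_right d j, by positivity⟩
    calc d * j ≤ d * (n / d) := Nat.mul_le_mul_left d hjn
      _ ≤ n := Nat.mul_div_le n d
  · rintro ⟨b, e⟩ hx
    simp only [Finset.mem_sigma, Finset.mem_Ioc, Nat.mem_divisors] at hx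
    obtain ⟨⟨hb0, _⟩, he, _⟩ := hx
    simp [Nat.mul_div_cancel' he]
  · rintro ⟨d, j⟩ hx
    simp only [Finset.mem_sigma, Finset.mem_Ioc] at hx
    obtain ⟨⟨hd0, _⟩, _, _⟩ := hx
    simp [Nat.mul_div_cancel_left j hd0]
  · rintro ⟨b, e⟩ hx
    simp only [Finset.mem_sigma, Finset.mem_Ioc, Nat.mem_divisors] at hx
    obtain ⟨⟨hb0, _⟩, he, _⟩ := hx
    simp [Nat.mul_div_cancel' he]

-- ===== VERDICT =====
theorem compute_R_at_kp_spec : Claim_equal_compute_R_at_kp := by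
  intro k p N mu_arr _ _
  unfold Spec_compute_R_at_kp
  rw [pvA_char, pvB_char, pvSwap (pvTerm k p mu_arr) N.toNat]
  congr 1
  have hsub : Finset.Ioc 0 (min N ((mu_arr.length : Int) - 1)).toNat ⊆ Finset.Ioc 0 N.toNat :=
    Finset.Ioc_subset_Ioc le_rfl (Int.toNat_le_toNat (min_le_left _ _))
  refine (Finset.sum_subset hsub ?_).symm
  intro d hdn hdt
  rw [Finset.mem_Ioc] at hdn
  simp only [Finset.mem_Ioc, not_and, not_le] at hdt
  have hLd : (mu_arr.length : Int) - 1 < (d : Int) := by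
    have h1 := hdt hdn.1
    rcases le_total N ((mu_arr.length : Int) - 1) with h | h
    · exfalso
      rw [min_eq_left h] at h1
      omega
    · rw [min_eq_right h] at h1
      omega
  refine Finset.sum_eq_zero fun j _ => ?_
  rw [pvTerm, if_neg (by rw [not_and_or]; right; omega)]
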